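-- pv_equiv track=rewrite | github.com/lee2nd/Software-Testing-2 | 5.5 @ loop testing/Lab 5.5.1 PyCode loop testing/findMatchPairs.py | find_matching_pairs
-- ===== SOURCE A (Python) =====
-- def find_matching_pairs(numbers):
--     matching_pairs = []
--
--     for i in range(len(numbers)):
--         outer_num = numbers[i]
--
--         for j in range(i + 1, len(numbers)):
--             inner_num = numbers[j]
--
--             if outer_num % 2 == 0 and inner_num % 2 == 0:
--                 matching_pairs.append([outer_num, inner_num])
--                 continue  # Skip to the next iteration of the inner loop
--
--             if outer_num % 2 != 0 and inner_num % 2 != 0: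
--                 break  # Exit the inner loop if both numbers are odd
--
--     return matching_pairs
-- ===== SOURCE B (Python) =====
-- def find_matching_pairs(numbers):
--     evens = [x for x in numbers if x % 2 == 0]
--     return [[e, f] for i, e in enumerate(evens) for f in evens[i + 1:]]
-- ===== Notes on version B (the rewrite author's own statement) =====
-- stated objective: faster
-- what changed: A's odd-outer break never affects the output, so B filters the even values once and enumerates all ordered pairs of that filtered list, instead of A's nested scan over the whole input with parity tests in the inner loop.
import Mathlib
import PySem

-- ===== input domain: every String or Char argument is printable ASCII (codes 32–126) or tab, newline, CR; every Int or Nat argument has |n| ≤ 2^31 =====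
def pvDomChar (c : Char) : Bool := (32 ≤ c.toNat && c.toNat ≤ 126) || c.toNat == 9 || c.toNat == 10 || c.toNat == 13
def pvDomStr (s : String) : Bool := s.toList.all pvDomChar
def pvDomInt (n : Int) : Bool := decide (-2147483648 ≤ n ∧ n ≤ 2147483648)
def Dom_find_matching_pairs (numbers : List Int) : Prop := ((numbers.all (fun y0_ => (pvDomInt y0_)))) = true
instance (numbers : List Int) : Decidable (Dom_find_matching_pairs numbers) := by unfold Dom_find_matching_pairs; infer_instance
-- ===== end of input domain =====

-- B replaces A's O(n^2) nested scan (with parity tests and a break in the inner loop)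
-- by filtering the even values once and pairing every even with the evens after it.

-- ===== PORT A =====
-- inner loop of A: scan the elements after outer_num; append [outer,inner] when both
-- even (continue), break when both odd, otherwise fall through to the next j.
def pvInnerA (outer : Int) : List Int → List (List Int)
  | [] => []
  | x :: xs =>
    if PySem.Int.mod outer 2 = 0 ∧ PySem.Int.mod x 2 = 0 then
      [outer, x] :: pvInnerA outer xs
    else if PySem.Int.mod outer 2 ≠ 0 ∧ PySem.Int.mod x 2 ≠ 0 then
      []
    else
      pvInnerA outer xs

-- outer loop of A over i = 0 .. len-1, accumulating the inner loop's appends.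
def pvOuterA : List Int → List (List Int)
  | [] => []
  | x :: xs => pvInnerA x xs ++ pvOuterA xs

def find_matching_pairs (numbers : List Int) : List (List Int) := pvOuterA numbers

-- ===== PORT B =====
-- pairs of the filtered list: each element with every element after it, in order.
def pvPairsB : List Int → List (List Int)
  | [] => []
  | e :: es => es.map (fun f => [e, f]) ++ pvPairsB es

def find_matching_pairs_alt (numbers : List Int) : List (List Int) :=
  pvPairsB (numbers.filter (fun x => PySem.Int.mod x 2 == 0))

-- ===== PRECONDITION & SPEC =====
def Spec_find_matching_pairs (numbers : List Int) (out : List (List Int)) : Prop := out = find_matching_pairs_alt numbers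
instance (numbers : List Int) (out : List (List Int)) : Decidable (Spec_find_matching_pairs numbers out) := by unfold Spec_find_matching_pairs; infer_instance

-- ===== CLAIM (what is proved, stated in full; the proofs are below) =====
def Claim_equal_find_matching_pairs : Prop := ∀ (numbers : List Int), Dom_find_matching_pairs numbers → Spec_find_matching_pairs numbers (find_matching_pairs numbers)

-- ===== LEMMAS AND PROOFS =====

theorem pvInnerA_odd (outer : Int) (h : PySem.Int.mod outer 2 ≠ 0) :
    ∀ xs : List Int, pvInnerA outer xs = [] := by
  intro xs
  induction xs with
  | nil => rfl
  | cons x xs ih =>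
    simp only [pvInnerA]
    by_cases hx : PySem.Int.mod x 2 = 0
    · rw [if_neg (by tauto), if_neg (by tauto)]; exact ih
    · rw [if_neg (by tauto), if_pos ⟨h, hx⟩]

theorem pvInnerA_even (outer : Int) (h : PySem.Int.mod outer 2 = 0) :
    ∀ xs : List Int,
      pvInnerA outer xs
        = (xs.filter (fun x => PySem.Int.mod x 2 == 0)).map (fun f => [outer, f]) := by
  intro xs
  induction xs with
  | nil => rfl
  | cons x xs ih =>
    simp only [pvInnerA]
    by_cases hx : PySem.Int.mod x 2 = 0
    · have hb : (PySem.Int.mod x 2 == 0) = true := by simpa using hx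
      rw [if_pos ⟨h, hx⟩, List.filter_cons, hb, if_pos rfl, List.map_cons, ih]
    · have hb : (PySem.Int.mod x 2 == 0) = false := by simpa using hx
      rw [if_neg (by tauto), if_neg (by tauto), List.filter_cons, hb,
        if_neg Bool.false_ne_true, ih]

theorem pvOuterA_eq (xs : List Int) :
    pvOuterA xs = pvPairsB (xs.filter (fun x => PySem.Int.mod x 2 == 0)) := by
  induction xs with
  | nil => rfl
  | cons x xs ih =>
    simp only [pvOuterA, List.filter_cons]
    by_cases hx : PySem.Int.mod x 2 = 0
    · have hb : (PySem.Int.mod x 2 == 0) = true := by simpa using hx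
      rw [hb, if_pos rfl, pvPairsB, pvInnerA_even x hx xs, ih]
    · have hb : (PySem.Int.mod x 2 == 0) = false := by simpa using hx
      rw [hb, if_neg Bool.false_ne_true, pvInnerA_odd x hx xs, ih, List.nil_append]

-- ===== VERDICT (by name: the statement is the Claim_ definition above) =====
theorem find_matching_pairs_spec : Claim_equal_find_matching_pairs := by
  intro numbers _
  show find_matching_pairs numbers = find_matching_pairs_alt numbers
  exact pvOuterA_eq numbers
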